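-- pv_equiv track=rewrite | github.com/Nana7mi-swjtu/agent | app/rag/providers/semantic_chunking_provider.py | _normalize_with_mapping
-- ===== SOURCE A (Python) =====
-- def _normalize_with_mapping(text: str) -> tuple[str, list[int]]:
--     normalized_chars: list[str] = []
--     mapping: list[int] = []
--     in_ws = False
--     for idx, char in enumerate(text):
--         if char.isspace():
--             if not in_ws:
--                 normalized_chars.append(" ")
--                 mapping.append(idx)
--             in_ws = True
--             continue
--         in_ws = False
--         normalized_chars.append(char)
--         mapping.append(idx)
--     normalized = "".join(normalized_chars).strip()
--     if not normalized:
--         return "", []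
--     left_trim = 0
--     while left_trim < len(normalized_chars) and normalized_chars[left_trim].isspace():
--         left_trim += 1
--     right_trim = len(normalized_chars)
--     while right_trim > 0 and normalized_chars[right_trim - 1].isspace():
--         right_trim -= 1
--     return normalized, mapping[left_trim:right_trim]
-- ===== SOURCE B (Python) =====
-- def _normalize_with_mapping(text: str) -> tuple[str, list[int]]:
--     # Declarative index-filter formulation: an index i of the trimmed span
--     # [first non-space, last non-space] is kept iff its char is non-space or
--     # it starts a whitespace run (previous char non-space); whitespace kept
--     # positions render as a single ' '.
--     nonsp = [i for i, c in enumerate(text) if not c.isspace()]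
--     if not nonsp:
--         return "", []
--     lo, hi = nonsp[0], nonsp[-1]
--     keep = [i for i in range(lo, hi + 1)
--             if not text[i].isspace() or not text[i - 1].isspace()]
--     return "".join(" " if text[i].isspace() else text[i] for i in keep), keep
-- ===== Notes on version B (the rewrite author's own statement) =====
-- stated objective: alternative
-- what changed: B drops A's stateful scan (in_ws flag, strip() and two trimming while-loops) for a declarative index-filter formulation: it computes the first and last non-space index and keeps exactly the indices in that span whose char is non-space or whose predecessor is non-space, rendering kept whitespace indices as a single space.
import Mathlib
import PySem

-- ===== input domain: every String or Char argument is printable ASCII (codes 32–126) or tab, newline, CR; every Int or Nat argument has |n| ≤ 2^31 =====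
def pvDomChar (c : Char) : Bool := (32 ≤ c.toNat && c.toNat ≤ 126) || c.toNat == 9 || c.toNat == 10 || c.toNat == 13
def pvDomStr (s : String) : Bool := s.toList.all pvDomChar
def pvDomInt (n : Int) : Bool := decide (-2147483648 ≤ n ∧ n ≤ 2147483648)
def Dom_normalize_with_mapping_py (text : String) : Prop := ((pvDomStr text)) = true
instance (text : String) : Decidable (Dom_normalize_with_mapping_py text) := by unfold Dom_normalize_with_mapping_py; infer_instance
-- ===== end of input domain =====

-- B replaces A's stateful scan (in_ws flag, then strip() and two trimming while-loops) by a
-- declarative index filter: compute the first and last non-space index, then keep exactly the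
-- indices in that span whose char is non-space or whose predecessor is non-space
-- (objective: alternative).

-- ===== PORT A =====
-- the 'for idx, char in enumerate(text)' loop, state (normalized_chars, mapping, in_ws)
def pvAloop : List (Int × Char) → Bool → List Char × List Int
  | [], _ => ([], [])
  | (idx, c) :: rest, in_ws =>
    if PySem.Chars.isspace c then
      if in_ws then pvAloop rest true
      else
        let r := pvAloop rest true
        (' ' :: r.1, idx :: r.2)
    else
      let r := pvAloop rest false
      (c :: r.1, idx :: r.2)

-- 'while left_trim < len(chars) and chars[left_trim].isspace(): left_trim += 1' (front scan)
def pvAleft : List Char → Nat → Nat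
  | [], acc => acc
  | c :: rest, acc => if PySem.Chars.isspace c then pvAleft rest (acc + 1) else acc

-- 'while right_trim > 0 and chars[right_trim-1].isspace(): right_trim -= 1' — the same
-- whitespace-counting scan run from the back of the list
def pvAright (chars : List Char) : Nat := chars.length - pvAleft chars.reverse 0

def normalize_with_mapping_py (text : String) : String × List Int :=
  let r := pvAloop (PySem.List.enumerate text.toList 0) false
  let normalized := PySem.Str.strip (String.ofList r.1)
  if normalized = "" then ("", [])
  else
    let lt := pvAleft r.1 0
    let rt := pvAright r.1
    (normalized, PySem.List.slice r.2 (some (lt : Int)) (some (rt : Int)))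

-- ===== PORT B =====
-- '[i for i, c in enumerate(text) if not c.isspace()]', 'nonsp[0]' / 'nonsp[-1]',
-- 'range(lo, hi + 1)' with the short-circuit predicate, and ''.join over single chars
-- (String.ofList). text[i] / text[i-1] are always in range (i-1 = -1 only wraps, as in
-- Python), so pyGetD's default is unreachable.
def normalize_with_mapping_py_alt (text : String) : String × List Int :=
  let cs := text.toList
  let nonsp := ((PySem.List.enumerate cs 0).filter
      (fun p => !(PySem.Chars.isspace p.2))).map (·.1)
  if nonsp = [] then ("", [])
  else
    let lo := PySem.List.pyGetD nonsp 0 0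
    let hi := PySem.List.pyGetD nonsp (-1) 0
    let keep := (PySem.List.pyRange lo (hi + 1) 1).filter
      (fun j => !(PySem.Chars.isspace (PySem.List.pyGetD cs j ' ')) ||
                !(PySem.Chars.isspace (PySem.List.pyGetD cs (j - 1) ' ')))
    (String.ofList (keep.map (fun j =>
        if PySem.Chars.isspace (PySem.List.pyGetD cs j ' ') then ' '
        else PySem.List.pyGetD cs j ' ')),
     keep)

-- ===== PRECONDITION & SPEC =====
def Spec_normalize_with_mapping_py (text : String) (out : String × List Int) : Prop := out = normalize_with_mapping_py_alt text
instance (text : String) (out : String × List Int) : Decidable (Spec_normalize_with_mapping_py text out) := by unfold Spec_normalize_with_mapping_py; infer_instance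

-- ===== CLAIM (what is proved, stated in full; the proofs are below) =====
def Claim_equal_normalize_with_mapping_py : Prop := ∀ (text : String), Dom_normalize_with_mapping_py text → Spec_normalize_with_mapping_py text (normalize_with_mapping_py text)

-- ===== LEMMAS AND PROOFS =====

-- reference scan: the collapsed characters / mapped indices, one character at a time
def specC : List Char → Nat → Bool → List Char
  | [], _, _ => []
  | c :: rest, i, ws =>
    if PySem.Chars.isspace c then
      if ws then specC rest (i + 1) true else ' ' :: specC rest (i + 1) true
    else c :: specC rest (i + 1) false

def specM : List Char → Nat → Bool → List Int
  | [], _, _ => []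
  | c :: rest, i, ws =>
    if PySem.Chars.isspace c then
      if ws then specM rest (i + 1) true else (i : Int) :: specM rest (i + 1) true
    else (i : Int) :: specM rest (i + 1) false

theorem pvA_eq (cs : List Char) : ∀ (i : Nat) (ws : Bool),
    pvAloop (PySem.List.enumerate cs (i : Int)) ws = (specC cs i ws, specM cs i ws) := by
  induction cs with
  | nil => intro i ws; simp [PySem.List.enumerate_nil, pvAloop, specC, specM]
  | cons c rest ih =>
    intro i ws
    rw [PySem.List.enumerate_cons]
    have h1 : (i : Int) + 1 = ((i + 1 : Nat) : Int) := by push_cast; ring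
    have ih' := ih (i + 1)
    rw [← h1] at ih'
    by_cases h : PySem.Chars.isspace c <;> cases ws <;>
      simp [pvAloop, specC, specM, h, ih']

-- every whitespace entry of the collapsed list is the literal ' '
theorem spec_blank (cs : List Char) : ∀ (i : Nat) (ws : Bool) (c : Char),
    c ∈ specC cs i ws → PySem.Chars.isspace c = true → c = ' ' := by
  induction cs with
  | nil => intro i ws c hm; simp [specC] at hm
  | cons d rest ih =>
    intro i ws c hm hs
    by_cases h : PySem.Chars.isspace d
    · cases ws
      · simp [specC, h] at hm
        rcases hm with h1 | h1
        · exact h1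
        · exact ih _ _ _ h1 hs
      · simp [specC, h] at hm
        exact ih _ _ _ hm hs
    · simp [specC, h] at hm
      rcases hm with h1 | h1
      · subst h1; simp [h] at hs
      · exact ih _ _ _ h1 hs

theorem spec_head_true (cs : List Char) : ∀ (i : Nat) (c : Char),
    (specC cs i true).head? = some c → PySem.Chars.isspace c = false := by
  induction cs with
  | nil => intro i c h; simp [specC] at h
  | cons d rest ih =>
    intro i c h
    by_cases hd : PySem.Chars.isspace d
    · exact ih _ _ (by simpa [specC, hd] using h)
    · simp [specC, hd] at h
      subst h
      simpa using hd

def pvNoAdj (L : List Char) : Prop :=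
  List.IsChain (fun a b => ¬(PySem.Chars.isspace a = true ∧ PySem.Chars.isspace b = true)) L

theorem spec_chain (cs : List Char) : ∀ (i : Nat) (ws : Bool), pvNoAdj (specC cs i ws) := by
  induction cs with
  | nil => intro i ws; simp [specC, pvNoAdj]
  | cons d rest ih =>
    intro i ws
    by_cases hd : PySem.Chars.isspace d
    · cases ws
      · have he : specC (d :: rest) i false = ' ' :: specC rest (i + 1) true := by
          simp [specC, hd]
        unfold pvNoAdj
        rw [he, List.isChain_cons]
        refine ⟨?_, ih (i + 1) true⟩
        intro b hb
        have := spec_head_true rest (i + 1) b hb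
        simp [this]
      · have he : specC (d :: rest) i true = specC rest (i + 1) true := by
          simp [specC, hd]
        unfold pvNoAdj
        rw [he]
        exact ih (i + 1) true
    · have he : specC (d :: rest) i ws = d :: specC rest (i + 1) false := by
        simp [specC, hd]
      unfold pvNoAdj
      rw [he, List.isChain_cons]
      exact ⟨fun b _ => by simp [hd], ih (i + 1) false⟩

theorem pvNoAdj_reverse (L : List Char) (h : pvNoAdj L) : pvNoAdj L.reverse := by
  unfold pvNoAdj at *
  rw [List.isChain_reverse]
  exact h.imp (by tauto)

theorem dropWhile_eq (L : List Char)
    (hb : ∀ c ∈ L, PySem.Chars.isspace c = true → c = ' ') (hch : pvNoAdj L) :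
    L.dropWhile PySem.Chars.isspace = L.drop (if L.head? = some ' ' then 1 else 0) := by
  cases L with
  | nil => simp
  | cons c rest =>
    by_cases h : PySem.Chars.isspace c
    · have hc : c = ' ' := hb c (by simp) h
      subst hc
      rw [if_pos (by simp), List.dropWhile_cons_of_pos h]
      cases rest with
      | nil => simp
      | cons d r =>
        have hd : PySem.Chars.isspace d = false := by
          have := (List.isChain_cons.mp hch).1 d (by simp)
          simpa [h] using this
        rw [List.dropWhile_cons_of_neg (by simp [hd])]
        simp
    · have hne : ¬ (c :: rest).head? = some ' ' := by
        simp only [List.head?_cons, Option.some.injEq]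
        intro hc; subst hc; exact h (by decide)
      rw [if_neg hne, List.dropWhile_cons_of_neg (by simp [h])]
      simp

theorem pvAleft_eq (L : List Char)
    (hb : ∀ c ∈ L, PySem.Chars.isspace c = true → c = ' ') (hch : pvNoAdj L) :
    pvAleft L 0 = (if L.head? = some ' ' then 1 else 0) := by
  cases L with
  | nil => simp [pvAleft]
  | cons c rest =>
    by_cases h : PySem.Chars.isspace c
    · have hc : c = ' ' := hb c (by simp) h
      subst hc
      rw [if_pos (by simp)]
      have h1 : pvAleft (' ' :: rest) 0 = pvAleft rest 1 := by simp [pvAleft, h]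
      rw [h1]
      cases rest with
      | nil => simp [pvAleft]
      | cons d r =>
        have hd : PySem.Chars.isspace d = false := by
          have := (List.isChain_cons.mp hch).1 d (by simp)
          simpa [h] using this
        simp [pvAleft, hd]
    · have hne : ¬ (c :: rest).head? = some ' ' := by
        simp only [List.head?_cons, Option.some.injEq]
        intro hc; subst hc; exact h (by decide)
      rw [if_neg hne]
      simp [pvAleft, h]

theorem rstrip_eq (K : List Char)
    (hb : ∀ c ∈ K, PySem.Chars.isspace c = true → c = ' ') (hch : pvNoAdj K) :
    PySem.Chars.rstrip K = K.take (K.length - (if K.getLast? = some ' ' then 1 else 0)) := by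
  unfold PySem.Chars.rstrip
  rw [dropWhile_eq K.reverse (fun c hm hs => hb c (List.mem_reverse.mp hm) hs)
      (pvNoAdj_reverse K hch), List.head?_reverse, List.drop_reverse, List.reverse_reverse]

theorem chain_drop (L : List Char) (hch : pvNoAdj L) :
    pvNoAdj (L.drop (if L.head? = some ' ' then 1 else 0)) := by
  split_ifs
  · rw [List.drop_one]; exact hch.tail
  · simpa using hch

theorem strip_eq (L : List Char)
    (hb : ∀ c ∈ L, PySem.Chars.isspace c = true → c = ' ') (hch : pvNoAdj L) :
    PySem.Chars.strip L =
      (L.drop (if L.head? = some ' ' then 1 else 0)).take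
        ((L.drop (if L.head? = some ' ' then 1 else 0)).length -
          (if (L.drop (if L.head? = some ' ' then 1 else 0)).getLast? = some ' ' then 1 else 0)) := by
  unfold PySem.Chars.strip PySem.Chars.lstrip
  rw [dropWhile_eq L hb hch]
  exact rstrip_eq _ (fun c hm hs => hb c (List.mem_of_mem_drop hm) hs) (chain_drop L hch)

-- A's post-processing (strip + the two trim scans) as a pure drop/take on the collapsed pair
theorem post_eq (L : List Char) (M : List Int)
    (hb : ∀ c ∈ L, PySem.Chars.isspace c = true → c = ' ') (hch : pvNoAdj L) :
    (let normalized := PySem.Str.strip (String.ofList L)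
     if normalized = "" then (("" : String), ([] : List Int))
     else (normalized,
       PySem.List.slice M (some ((pvAleft L 0 : Nat) : Int)) (some ((pvAright L : Nat) : Int))))
    =
    (let lo : Nat := if L.head? = some ' ' then 1 else 0
     let hi : Nat := if lo < L.length ∧ L.getLast? = some ' ' then L.length - 1 else L.length
     (String.ofList (PySem.List.slice L (some (lo : Int)) (some (hi : Int))),
      PySem.List.slice M (some (lo : Int)) (some (hi : Int)))) := by
  dsimp only
  have hlt := pvAleft_eq L hb hch
  have hstrip := strip_eq L hb hch
  have hofl : PySem.Str.strip (String.ofList L) = String.ofList (PySem.Chars.strip L) := by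
    have h1 := congrArg String.ofList (PySem.Str.toList_strip (String.ofList L))
    rw [String.ofList_toList, String.toList_ofList] at h1
    exact h1
  by_cases hK : L.drop (if L.head? = some ' ' then 1 else 0) = []
  · -- L is [] or [' ']: both sides are ("", [])
    have hL : L = [] ∨ L = [' '] := by
      cases L with
      | nil => exact Or.inl rfl
      | cons c rest =>
        right
        by_cases hh : (c :: rest).head? = some ' '
        · simp only [hh, if_pos] at hK
          have hc : c = ' ' := by simpa using hh
          subst hc
          simp at hK
          rw [hK]
        · rw [if_neg hh] at hK
          simp at hK
    have hcond : PySem.Str.strip (String.ofList L) = "" := by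
      rcases hL with rfl | rfl <;> decide
    rw [if_pos hcond]
    have hs0 : ∀ {α : Type} (N : List α), PySem.List.slice N none (some (0 : Int)) = [] := by
      intro α N
      rw [PySem.List.slice_to N (by norm_num)]
      simp
    have hs1 : ∀ {α : Type} (N : List α),
        PySem.List.slice N (some (1 : Int)) (some (1 : Int)) = [] := by
      intro α N
      rw [PySem.List.slice_toNat N (by norm_num) (by norm_num)]
      simp
    rcases hL with rfl | rfl <;> simp [hs0, hs1]
  · -- the collapsed list still has a word in it
    have hlt2 : (if L.head? = some ' ' then 1 else 0) < L.length := by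
      rcases Nat.lt_or_ge (if L.head? = some ' ' then 1 else 0) L.length with h | h
      · exact h
      · exact absurd (List.drop_eq_nil_iff.mpr h) hK
    have hKlast : L.getLast? = (L.drop (if L.head? = some ' ' then 1 else 0)).getLast? := by
      conv_lhs => rw [← List.take_append_drop (if L.head? = some ' ' then 1 else 0) L]
      rw [List.getLast?_append]
      cases hg : (L.drop (if L.head? = some ' ' then 1 else 0)).getLast? with
      | none => exact absurd (List.getLast?_eq_none_iff.mp hg) hK
      | some g => simp
    have htr : pvAleft L.reverse 0 = (if L.getLast? = some ' ' then 1 else 0) := by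
      have h1 := pvAleft_eq L.reverse (fun c hm hs => hb c (List.mem_reverse.mp hm) hs)
        (pvNoAdj_reverse L hch)
      rwa [List.head?_reverse] at h1
    -- head of the remainder is not whitespace
    have hKhead : ∀ k, (L.drop (if L.head? = some ' ' then 1 else 0)).head? = some k →
        PySem.Chars.isspace k = false := by
      intro k hk
      by_cases hh : L.head? = some ' '
      · cases L with
        | nil => simp at hh
        | cons c rest =>
          have hc : c = ' ' := by simpa using hh
          subst hc
          simp only [hh, if_pos, List.drop_succ_cons, List.drop_zero] at hk
          have h2 := (List.isChain_cons.mp hch).1 k hk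
          have h3 : PySem.Chars.isspace ' ' = true := by decide
          simpa [h3] using h2
      · simp only [hh, if_false] at hk
        by_contra hcon
        have hk' : PySem.Chars.isspace k = true := by
          cases hks : PySem.Chars.isspace k
          · exact absurd hks hcon
          · rfl
        have : k = ' ' := hb k (List.mem_of_mem_head? hk) hk'
        subst this
        exact hh hk
    -- length bound: what survives the right trim is nonempty
    have hlen2 : 1 ≤ (L.drop (if L.head? = some ' ' then 1 else 0)).length -
        (if (L.drop (if L.head? = some ' ' then 1 else 0)).getLast? = some ' ' then 1 else 0) := by
      cases hKc : L.drop (if L.head? = some ' ' then 1 else 0) with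
      | nil => exact absurd hKc hK
      | cons k K' =>
        have hkns := hKhead k (by rw [hKc]; rfl)
        cases K' with
        | nil =>
          have hkne : k ≠ ' ' := by
            intro h; subst h; exact absurd hkns (by decide)
          simp [hkne]
        | cons k2 K'' =>
          simp only [List.length_cons]
          by_cases hg : (k :: k2 :: K'').getLast? = some ' '
          · rw [if_pos hg]; omega
          · rw [if_neg hg]; omega
    have hSne : PySem.Chars.strip L ≠ [] := by
      rw [hstrip]
      intro h0
      rcases List.take_eq_nil_iff.mp h0 with h1 | h1
      · omega
      · exact hK h1
    have hnorm : PySem.Str.strip (String.ofList L) ≠ "" := by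
      rw [hofl]
      intro h0
      exact hSne (by simpa using congrArg String.toList h0)
    rw [if_neg hnorm]
    have hHI : pvAright L = (if (if L.head? = some ' ' then 1 else 0) < L.length ∧
        L.getLast? = some ' ' then L.length - 1 else L.length) := by
      unfold pvAright
      rw [htr]
      by_cases hg : L.getLast? = some ' ' <;> simp [hg, hlt2]
    have hKlen : (L.drop (if L.head? = some ' ' then 1 else 0)).length =
        L.length - (if L.head? = some ' ' then 1 else 0) := List.length_drop
    refine Prod.ext ?_ ?_
    · -- the string components
      show PySem.Str.strip (String.ofList L) = _
      rw [hofl, hstrip]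
      congr 1
      rw [PySem.List.slice_natCast]
      congr 1
      rw [← hKlast] at *
      by_cases hg : L.getLast? = some ' ' <;> simp [hg, hlt2] at * <;> omega
    · show PySem.List.slice M (some ((pvAleft L 0 : Nat) : Int)) (some ((pvAright L : Nat) : Int)) = _
      rw [hlt, hHI]

-- ===== new material: append/segment lemmas for the collapsed scan =====

def wsAfter (xs : List Char) (ws : Bool) : Bool :=
  match xs.getLast? with
  | none => ws
  | some c => PySem.Chars.isspace c

theorem wsAfter_cons (c : Char) (rest : List Char) (ws : Bool) :
    wsAfter (c :: rest) ws = wsAfter rest (PySem.Chars.isspace c) := by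
  cases rest with
  | nil => simp [wsAfter]
  | cons d r =>
    unfold wsAfter
    rw [List.getLast?_cons_cons]
    cases h : (d :: r).getLast? with
    | none => simp at h
    | some x => rfl

theorem spec_append (xs : List Char) : ∀ (ys : List Char) (k : Nat) (ws : Bool),
    specC (xs ++ ys) k ws = specC xs k ws ++ specC ys (k + xs.length) (wsAfter xs ws)
    ∧ specM (xs ++ ys) k ws = specM xs k ws ++ specM ys (k + xs.length) (wsAfter xs ws) := by
  induction xs with
  | nil => intro ys k ws; simp [specC, specM, wsAfter]
  | cons c rest ih =>
    intro ys k ws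
    have h1 := ih ys (k + 1) (PySem.Chars.isspace c)
    have h2 : k + (rest.length + 1) = k + 1 + rest.length := by omega
    rw [wsAfter_cons]
    cases h : PySem.Chars.isspace c <;> rw [h] at h1 <;> cases ws <;>
      simp [specC, specM, h, h1.1, h1.2, h2]

theorem spec_allsp_true (xs : List Char) (h : ∀ c ∈ xs, PySem.Chars.isspace c = true) :
    ∀ k, specC xs k true = [] ∧ specM xs k true = [] := by
  induction xs with
  | nil => intro k; simp [specC, specM]
  | cons c rest ih =>
    intro k
    have hc := h c (by simp)
    have ih' := ih (fun d hd => h d (by simp [hd])) (k + 1)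
    simp [specC, specM, hc, ih'.1, ih'.2]

theorem spec_allsp_false (xs : List Char) (h : ∀ c ∈ xs, PySem.Chars.isspace c = true)
    (hne : xs ≠ []) : ∀ k, specC xs k false = [' '] ∧ specM xs k false = [(k : Int)] := by
  cases xs with
  | nil => exact absurd rfl hne
  | cons c rest =>
    intro k
    have hc := h c (by simp)
    have ht := spec_allsp_true rest (fun d hd => h d (by simp [hd])) (k + 1)
    simp [specC, specM, hc, ht.1, ht.2]

theorem spec_head_ns (c : Char) (rest : List Char) (h : PySem.Chars.isspace c = false)
    (k : Nat) (ws : Bool) :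
    specC (c :: rest) k ws = specC (c :: rest) k false
    ∧ specM (c :: rest) k ws = specM (c :: rest) k false := by
  cases ws <;> simp [specC, specM, h]

theorem spec_len (xs : List Char) : ∀ (k : Nat) (ws : Bool),
    (specC xs k ws).length = (specM xs k ws).length := by
  induction xs with
  | nil => intro k ws; simp [specC, specM]
  | cons c rest ih =>
    intro k ws
    by_cases h : PySem.Chars.isspace c <;> cases ws <;> simp [specC, specM, h, ih]

-- split any list so that the tail part is all-whitespace and the front ends non-whitespace
theorem rsplit (l : List Char) : ∃ m p, l = m ++ p ∧ (∀ c ∈ p, PySem.Chars.isspace c = true)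
    ∧ (∀ h, m.getLast? = some h → PySem.Chars.isspace h = false) := by
  induction l using List.reverseRecOn with
  | nil => exact ⟨[], [], by simp⟩
  | append_singleton init c ih =>
    by_cases hc : PySem.Chars.isspace c
    · obtain ⟨m, p, he, hp, hm⟩ := ih
      exact ⟨m, p ++ [c], by simp [he], by
        intro d hd
        rcases List.mem_append.mp hd with h1 | h1
        · exact hp d h1
        · simp at h1; subst h1; exact hc, hm⟩
    · exact ⟨init ++ [c], [], by simp, by simp, by
        intro h hh
        rw [List.getLast?_concat] at hh
        cases hh
        simpa using hc⟩

-- B's filter over the trimmed index range computes the collapsed scan of the middle segment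
theorem pvBF (cs : List Char) : ∀ (mid : List Char) (k : Nat) (w : Bool),
    (∀ t, t < mid.length → PySem.List.pyGetD cs ((k : Int) + t) ' ' = mid.getD t ' ') →
    PySem.Chars.isspace (PySem.List.pyGetD cs ((k : Int) - 1) ' ') = w →
    (PySem.List.pyRange k (k + mid.length) 1).filter
        (fun j => !(PySem.Chars.isspace (PySem.List.pyGetD cs j ' ')) ||
                  !(PySem.Chars.isspace (PySem.List.pyGetD cs (j - 1) ' '))) = specM mid k w := by
  intro mid
  induction mid with
  | nil =>
    intro k w hget hw
    rw [PySem.List.pyRange_one_eq_nil (by simp)]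
    simp [specM]
  | cons c rest ih =>
    intro k w hget hw
    have hc : PySem.List.pyGetD cs (k : Int) ' ' = c := by
      simpa using hget 0 (by simp)
    have hcons : PySem.List.pyRange (k : Int) ((k : Int) + ((c :: rest).length : Int)) 1 =
        (k : Int) :: PySem.List.pyRange ((k : Int) + 1) ((k : Int) + ((c :: rest).length : Int)) 1 :=
      PySem.List.pyRange_one_cons (by
        have h0 : (0 : Int) < ((c :: rest).length : Int) := by simp
        omega)
    have hkk : ((k : Int) + 1) = (((k + 1 : Nat)) : Int) := by push_cast; ring
    have he2 : ((k : Int) + ((c :: rest).length : Int)) =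
        (((k + 1 : Nat)) : Int) + (rest.length : Int) := by
      simp; push_cast; ring
    have hget' : ∀ t, t < rest.length →
        PySem.List.pyGetD cs (((k + 1 : Nat) : Int) + t) ' ' = rest.getD t ' ' := by
      intro t ht
      have := hget (t + 1) (by simp; omega)
      have he : ((k : Int) + ((t + 1 : Nat) : Int)) = (((k + 1 : Nat)) : Int) + (t : Int) := by
        push_cast; ring
      rw [he] at this
      simpa using this
    have hw' : PySem.Chars.isspace (PySem.List.pyGetD cs (((k + 1 : Nat) : Int) - 1) ' ')
        = PySem.Chars.isspace c := by
      have he : (((k + 1 : Nat) : Int) - 1) = (k : Int) := by push_cast; ring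
      rw [he, hc]
    rw [hcons, he2, hkk]
    cases hsc : PySem.Chars.isspace c with
    | false =>
      have ihh := ih (k + 1) false hget' (by rw [hw', hsc])
      push_cast at ihh
      cases w <;> simp [List.filter_cons, hc, hw, hsc, specM, ihh]
    | true =>
      have ihh := ih (k + 1) true hget' (by rw [hw', hsc])
      push_cast at ihh
      cases w <;> simp [List.filter_cons, hc, hw, hsc, specM, ihh]

theorem pvRender (cs : List Char) : ∀ (mid : List Char) (k : Nat) (w : Bool),
    (∀ t, t < mid.length → PySem.List.pyGetD cs ((k : Int) + t) ' ' = mid.getD t ' ') →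
    (specM mid k w).map (fun j =>
        if PySem.Chars.isspace (PySem.List.pyGetD cs j ' ') then ' '
        else PySem.List.pyGetD cs j ' ') = specC mid k w := by
  intro mid
  induction mid with
  | nil => intro k w _; simp [specC, specM]
  | cons c rest ih =>
    intro k w hget
    have hc : PySem.List.pyGetD cs (k : Int) ' ' = c := by
      simpa using hget 0 (by simp)
    have hget' : ∀ t, t < rest.length →
        PySem.List.pyGetD cs (((k + 1 : Nat) : Int) + t) ' ' = rest.getD t ' ' := by
      intro t ht
      have := hget (t + 1) (by simp; omega)
      have he : ((k : Int) + ((t + 1 : Nat) : Int)) = (((k + 1 : Nat)) : Int) + (t : Int) := by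
        push_cast; ring
      rw [he] at this
      simpa using this
    have ihh := fun w => ih (k + 1) w hget'
    cases hsc : PySem.Chars.isspace c <;> cases w <;>
      simp [specC, specM, hsc, hc, ihh]

theorem getLast?_cons_ne (c : Char) (l : List Char) (h : l ≠ []) :
    (c :: l).getLast? = l.getLast? := by
  cases l with
  | nil => exact absurd rfl h
  | cons a t => simp [List.getLast?_cons_cons]

theorem pvTrim (Cmid : List Char) (Mmid : List Int) (b1 b2 : Bool) (x1 x2 : Int)
    (hne : Cmid ≠ []) (hlen : Cmid.length = Mmid.length)
    (hhd : Cmid.head? ≠ some ' ') (hlast : Cmid.getLast? ≠ some ' ') :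
    (let L := (if b1 then [' '] else []) ++ Cmid ++ (if b2 then [' '] else [])
     let M := (if b1 then [x1] else []) ++ Mmid ++ (if b2 then [x2] else [])
     let lo : Nat := if L.head? = some ' ' then 1 else 0
     let hi : Nat := if lo < L.length ∧ L.getLast? = some ' ' then L.length - 1 else L.length
     (String.ofList (PySem.List.slice L (some (lo : Int)) (some (hi : Int))),
      PySem.List.slice M (some (lo : Int)) (some (hi : Int))))
    = (String.ofList Cmid, Mmid) := by
  dsimp only
  cases b1 <;> cases b2 <;>
    simp only [if_true, if_false, List.nil_append, List.append_nil, List.singleton_append,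
      List.cons_append, Bool.false_eq_true] <;>
    rw [PySem.List.slice_natCast, PySem.List.slice_natCast]
  · -- no leading, no trailing space
    have hh : (Cmid.head? = some ' ') = False := by simp [hhd]
    have hg : (Cmid.getLast? = some ' ') = False := by simp [hlast]
    simp only [hh, if_false, hg, and_false, Nat.cast_zero, Nat.sub_zero, List.drop_zero]
    rw [List.take_length, hlen, List.take_length]
  · -- trailing space only
    have hh : ((Cmid ++ [' ']).head? = some ' ') = False := by
      cases Cmid with
      | nil => exact absurd rfl hne
      | cons a l => simpa using hhd
    have hg : (Cmid ++ [' ']).getLast? = some ' ' := by simp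
    have hl : 0 < (Cmid ++ [' ']).length := by simp
    simp only [hh, if_false, hg, hl, and_true, if_pos, Nat.cast_zero, Nat.sub_zero,
      List.drop_zero]
    have h1 : (Cmid ++ [' ']).length - 1 = Cmid.length := by simp
    rw [h1, List.take_left, hlen, List.take_left]
  · -- leading space only
    have hh : (' ' :: Cmid).head? = some ' ' := rfl
    have hg : ((' ' :: Cmid).getLast? = some ' ') = False := by
      rw [getLast?_cons_ne _ _ hne]
      simp [hlast]
    simp only [hh, if_pos, hg, and_false, if_false, Nat.cast_one, List.drop_one,
      List.tail_cons, List.length_cons, Nat.add_sub_cancel]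
    rw [List.take_length, hlen, List.take_length]
  · -- both
    have hh : (' ' :: (Cmid ++ [' '])).head? = some ' ' := rfl
    have hg : (' ' :: (Cmid ++ [' '])).getLast? = some ' ' := by
      rw [getLast?_cons_ne _ _ (by simp)]
      simp
    have hl : 1 < (' ' :: (Cmid ++ [' '])).length := by simp
    simp only [List.cons_append, hh, if_pos, hg, hl, and_true, Nat.cast_one,
      List.drop_one, List.tail_cons, List.length_cons, Nat.add_sub_cancel]
    have h2 : (if 1 < (Cmid ++ [' ']).length + 1 then (Cmid ++ [' ']).length
        else (Cmid ++ [' ']).length + 1) - 1 = Cmid.length := by simp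
    rw [h2, List.take_left, hlen, List.take_left]


-- enumerate-filter of an all-whitespace segment is empty
theorem filter_enum_nil (xs : List Char) (h : ∀ c ∈ xs, PySem.Chars.isspace c = true) :
    ∀ s : Int, (PySem.List.enumerate xs s).filter (fun p => !(PySem.Chars.isspace p.2)) = [] := by
  induction xs with
  | nil => intro s; simp [PySem.List.enumerate_nil]
  | cons c rest ih =>
    intro s
    rw [PySem.List.enumerate_cons]
    simp [h c (by simp), ih (fun d hd => h d (by simp [hd])) (s + 1)]

-- ===== VERDICT (by name: the statement is the Claim_ definition above) =====
set_option maxHeartbeats 2000000 in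
theorem normalize_with_mapping_py_spec : Claim_equal_normalize_with_mapping_py := by
  intro text _
  unfold Spec_normalize_with_mapping_py
  have hb := spec_blank text.toList 0 false
  have hch := spec_chain text.toList 0 false
  have hA : normalize_with_mapping_py text =
      (let L := specC text.toList 0 false
       let M := specM text.toList 0 false
       let lo : Nat := if L.head? = some ' ' then 1 else 0
       let hi : Nat := if lo < L.length ∧ L.getLast? = some ' ' then L.length - 1 else L.length
       (String.ofList (PySem.List.slice L (some (lo : Int)) (some (hi : Int))),
        PySem.List.slice M (some (lo : Int)) (some (hi : Int)))) := by
    unfold normalize_with_mapping_py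
    rw [show ((0 : Int) = ((0 : Nat) : Int)) from rfl, pvA_eq]
    exact post_eq _ _ hb hch
  rw [hA]
  by_cases hall : ∀ c ∈ text.toList, PySem.Chars.isspace c = true
  · -- the string is entirely whitespace: both sides are ("", [])
    have hB : normalize_with_mapping_py_alt text = ("", []) := by
      unfold normalize_with_mapping_py_alt
      dsimp only
      rw [filter_enum_nil text.toList hall 0]
      simp
    rw [hB]
    have hLM : (specC text.toList 0 false = [] ∧ specM text.toList 0 false = []) ∨
        (specC text.toList 0 false = [' '] ∧ specM text.toList 0 false = [(0 : Int)]) := by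
      cases h : text.toList with
      | nil => left; exact ⟨rfl, rfl⟩
      | cons c rest =>
        right
        have := spec_allsp_false (c :: rest) (h ▸ hall) (by simp) 0
        simpa using this
    rcases hLM with ⟨h1, h2⟩ | ⟨h1, h2⟩ <;> rw [h1, h2] <;> dsimp only <;>
      simp [PySem.List.slice_natCast, PySem.List.slice]
  · -- there is a non-whitespace character
    push_neg at hall
    obtain ⟨c0, hc0mem, hc0⟩ := hall
    replace hc0 : PySem.Chars.isspace c0 = false := by simpa using hc0
    set cs := text.toList with hcs
    have hsplit0 : cs.takeWhile PySem.Chars.isspace ++ cs.dropWhile PySem.Chars.isspace = cs :=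
      List.takeWhile_append_dropWhile
    set pre := cs.takeWhile PySem.Chars.isspace with hpre_def
    set rest := cs.dropWhile PySem.Chars.isspace with hrest_def
    have hpre_all : ∀ c ∈ pre, PySem.Chars.isspace c = true := fun c hc =>
      List.mem_takeWhile_imp hc
    have hrest_ne : rest ≠ [] := by
      intro h
      have h2 : cs = pre := by rw [← hsplit0, h, List.append_nil]
      rw [h2] at hc0mem
      rw [hpre_all c0 hc0mem] at hc0
      exact Bool.true_eq_false.mp hc0
    have hrest_head : ∀ c, rest.head? = some c → PySem.Chars.isspace c = false := by
      intro c hc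
      have h1 := List.head?_dropWhile_not PySem.Chars.isspace cs
      rw [← hrest_def, hc] at h1
      simpa using h1
    obtain ⟨mid, post, hre, hpost_all, hmlast⟩ := rsplit rest
    have hmid_ne : mid ≠ [] := by
      intro h
      rw [h, List.nil_append] at hre
      obtain ⟨r0, rt, hr⟩ := List.exists_cons_of_ne_nil hrest_ne
      have h1 := hrest_head r0 (by rw [hr]; rfl)
      have h2 : r0 ∈ post := by rw [← hre, hr]; simp
      rw [hpost_all r0 h2] at h1
      exact Bool.true_eq_false.mp h1
    obtain ⟨m0, mrest, hmid_eq⟩ := List.exists_cons_of_ne_nil hmid_ne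
    have hm0 : PySem.Chars.isspace m0 = false := by
      apply hrest_head
      rw [hre, hmid_eq]
      rfl
    have hmid_last : mid.getLast? = some (mid.getLast hmid_ne) :=
      List.getLast?_eq_some_getLast hmid_ne
    set mlast := mid.getLast hmid_ne with hmlast_def
    have hml : PySem.Chars.isspace mlast = false := hmlast mlast hmid_last
    set lo := pre.length with hlo_def
    set n1 := mid.length with hn1_def
    have hn1 : 1 ≤ n1 := by rw [hn1_def, hmid_eq]; simp
    have hsplit : cs = pre ++ (mid ++ post) := by rw [← hre]; exact hsplit0.symm
    set Cmid := specC mid lo false with hCmid_def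
    set Mmid := specM mid lo false with hMmid_def
    -- structure of Cmid
    have hCmid_cons : Cmid = m0 :: specC mrest (lo + 1) false := by
      rw [hCmid_def, hmid_eq]
      simp [specC, hm0]
    have hMmid_cons : Mmid = (lo : Int) :: specM mrest (lo + 1) false := by
      rw [hMmid_def, hmid_eq]
      simp [specM, hm0]
    have hCne : Cmid ≠ [] := by rw [hCmid_cons]; simp
    have hsp_sp : PySem.Chars.isspace ' ' = true := by decide
    have hChd : Cmid.head? ≠ some ' ' := by
      rw [hCmid_cons]
      simp only [List.head?_cons, ne_eq, Option.some.injEq]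
      intro h
      rw [h, hsp_sp] at hm0
      exact Bool.true_eq_false.mp hm0
    have hmid_dec : mid.dropLast ++ [mlast] = mid := List.dropLast_append_getLast hmid_ne
    have hClastC : Cmid.getLast? = some mlast := by
      rw [hCmid_def]
      conv_lhs => rw [← hmid_dec]
      rw [(spec_append mid.dropLast [mlast] lo false).1]
      have h1 : specC [mlast] (lo + mid.dropLast.length) (wsAfter mid.dropLast false) = [mlast] := by
        cases wsAfter mid.dropLast false <;> simp [specC, hml]
      rw [h1, List.getLast?_concat]
    have hClast : Cmid.getLast? ≠ some ' ' := by
      rw [hClastC]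
      simp only [ne_eq, Option.some.injEq]
      intro h
      rw [h, hsp_sp] at hml
      exact Bool.true_eq_false.mp hml
    have hlen : Cmid.length = Mmid.length := spec_len mid lo false
    -- the collapsed lists as three segments
    set b1 := !pre.isEmpty with hb1_def
    set b2 := !post.isEmpty with hb2_def
    have hA1 : specC pre 0 false = (if b1 then [' '] else []) := by
      cases hp : pre with
      | nil => rw [hb1_def, hp]; rfl
      | cons a l =>
        rw [hb1_def, hp]
        have := spec_allsp_false (a :: l) (hp ▸ hpre_all) (by simp) 0
        simpa using this.1
    have hA1M : specM pre 0 false = (if b1 then [(0 : Int)] else []) := by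
      cases hp : pre with
      | nil => rw [hb1_def, hp]; rfl
      | cons a l =>
        rw [hb1_def, hp]
        have := spec_allsp_false (a :: l) (hp ▸ hpre_all) (by simp) 0
        simpa using this.2
    have hP2 : specC post (lo + n1) false = (if b2 then [' '] else []) := by
      cases hp : post with
      | nil => rw [hb2_def, hp]; rfl
      | cons a l =>
        rw [hb2_def, hp]
        have := spec_allsp_false (a :: l) (hp ▸ hpost_all) (by simp) (lo + n1)
        simpa using this.1
    have hP2M : specM post (lo + n1) false = (if b2 then [((lo + n1 : Nat) : Int)] else []) := by
      cases hp : post with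
      | nil => rw [hb2_def, hp]; rfl
      | cons a l =>
        rw [hb2_def, hp]
        have := spec_allsp_false (a :: l) (hp ▸ hpost_all) (by simp) (lo + n1)
        simpa using this.2
    have hw2 : ∀ w, wsAfter mid w = false := by
      intro w
      unfold wsAfter
      rw [hmid_last]
      exact hml
    have hmid_w : ∀ w, specC mid lo w = Cmid ∧ specM mid lo w = Mmid := by
      intro w
      rw [hCmid_def, hMmid_def, hmid_eq]
      exact spec_head_ns m0 mrest hm0 lo w
    have hLeq : specC cs 0 false =
        (if b1 then [' '] else []) ++ (Cmid ++ (if b2 then [' '] else [])) := by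
      rw [hsplit, (spec_append pre (mid ++ post) 0 false).1]
      have hz : (0 : Nat) + pre.length = lo := by rw [hlo_def]; omega
      rw [hz, (spec_append mid post lo (wsAfter pre false)).1, (hmid_w _).1, hw2, hP2, hA1]
    have hMeq : specM cs 0 false =
        (if b1 then [(0 : Int)] else []) ++ (Mmid ++ (if b2 then [((lo + n1 : Nat) : Int)] else [])) := by
      rw [hsplit, (spec_append pre (mid ++ post) 0 false).2]
      have hz : (0 : Nat) + pre.length = lo := by rw [hlo_def]; omega
      rw [hz, (spec_append mid post lo (wsAfter pre false)).2, (hmid_w _).2, hw2, hP2M, hA1M]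
    -- ===== the B side =====
    have hget : ∀ t, t < mid.length →
        PySem.List.pyGetD cs ((lo : Int) + t) ' ' = mid.getD t ' ' := by
      intro t ht
      have h1 : PySem.List.pyGet? (pre ++ (mid ++ post)) ((pre.length : Int) + (t : Int)) =
          (mid ++ post)[t]? := PySem.List.pyGet?_append_right _ _ t
      rw [List.getElem?_append_left ht] at h1
      rw [show ((pre.length : Int)) = ((lo : Nat) : Int) from by rw [hlo_def]] at h1
      rw [hsplit]
      simp [PySem.List.pyGetD, h1, List.getD]
    have hnonsp : ((PySem.List.enumerate cs 0).filter
          (fun p => !(PySem.Chars.isspace p.2))).map (·.1)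
        = ((PySem.List.enumerate mid (lo : Int)).filter
          (fun p => !(PySem.Chars.isspace p.2))).map (·.1) := by
      rw [hsplit, PySem.List.enumerate_append, PySem.List.enumerate_append,
        List.filter_append, List.filter_append, filter_enum_nil pre hpre_all,
        filter_enum_nil post hpost_all]
      simp [hlo_def]
    have hNhead : ((PySem.List.enumerate mid (lo : Int)).filter
          (fun p => !(PySem.Chars.isspace p.2))).map (·.1)
        = (lo : Int) :: ((PySem.List.enumerate mrest ((lo : Int) + 1)).filter
          (fun p => !(PySem.Chars.isspace p.2))).map (·.1) := by
      rw [hmid_eq, PySem.List.enumerate_cons]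
      simp [hm0]
    have hNlast : (((PySem.List.enumerate mid (lo : Int)).filter
          (fun p => !(PySem.Chars.isspace p.2))).map (·.1)).getLast?
        = some ((lo : Int) + ((n1 - 1 : Nat) : Int)) := by
      conv_lhs => rw [← hmid_dec]
      rw [PySem.List.enumerate_append, List.filter_append, List.map_append]
      have hsing : ((PySem.List.enumerate [mlast] ((lo : Int) + mid.dropLast.length)).filter
          (fun p => !(PySem.Chars.isspace p.2))).map (·.1)
          = [(lo : Int) + mid.dropLast.length] := by
        rw [PySem.List.enumerate_cons, PySem.List.enumerate_nil]
        simp [hml]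
      rw [hsing, List.getLast?_concat]
      have : mid.dropLast.length = n1 - 1 := by rw [List.length_dropLast, hn1_def]
      rw [this]
    have hB : normalize_with_mapping_py_alt text = (String.ofList Cmid, Mmid) := by
      unfold normalize_with_mapping_py_alt
      dsimp only
      rw [← hcs, hnonsp, hNhead]
      rw [if_neg (by simp)]
      rw [← hNhead]
      have hg0 : PySem.List.pyGetD ((lo : Int) :: ((PySem.List.enumerate mrest ((lo : Int) + 1)).filter
          (fun p => !(PySem.Chars.isspace p.2))).map (·.1)) 0 0 = (lo : Int) := by
        simp [PySem.List.pyGetD]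
      have hgL : PySem.List.pyGetD (((PySem.List.enumerate mid (lo : Int)).filter
          (fun p => !(PySem.Chars.isspace p.2))).map (·.1)) (-1) 0
          = (lo : Int) + ((n1 - 1 : Nat) : Int) := by
        simp [PySem.List.pyGetD, PySem.List.pyGet?_neg_one, hNlast]
      rw [hNhead, hg0, ← hNhead, hgL]
      have hbnd : (lo : Int) + ((n1 - 1 : Nat) : Int) + 1 = (lo : Int) + (n1 : Int) := by
        have : 1 ≤ n1 := hn1
        push_cast [Nat.cast_sub this]
        ring
      rw [hbnd]
      have hkeep := pvBF cs mid lo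
        (PySem.Chars.isspace (PySem.List.pyGetD cs ((lo : Int) - 1) ' ')) hget rfl
      push_cast at hkeep
      rw [hkeep]
      have hmw := hmid_w (PySem.Chars.isspace (PySem.List.pyGetD cs ((lo : Int) - 1) ' '))
      rw [hmw.2]
      have hrender := pvRender cs mid lo
        (PySem.Chars.isspace (PySem.List.pyGetD cs ((lo : Int) - 1) ' ')) hget
      rw [hmw.2] at hrender
      rw [hrender, hmw.1]
    rw [hB, hLeq, hMeq]
    have ht := pvTrim Cmid Mmid b1 b2 0 ((lo + n1 : Nat) : Int) hCne hlen hChd hClast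
    dsimp only at ht ⊢
    simp only [List.append_assoc] at ht
    exact ht
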